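-- pv_equiv track=rewrite | github.com/CarterLevo/byobash | bin/byotools.py | shlex_parms_partition
-- ===== SOURCE A (Python) =====
-- def shlex_parms_partition(parms):
--     """Split Options from Positional Args, in the classic way of ArgParse and Sh"""
--
--     options = list()
--     seps = list()
--     words = list()
--
--     for (index, parm) in enumerate(parms):
--
--         # Pick out the First Sep
--         # and take the remaining Parms as Positional Args, not as Options
--
--         if parm == "--":
--             seps.append(parm)
--
--         # Pick out each Option, before the First Sep
--
--         elif (not seps) and (parm != "-") and parm.startswith("-"):
--             options.append(parm)
--
--         # Pick out each Arg, before the First Sep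
--
--         else:
--             words.append(parm)
--
--     return (options, seps, words)
-- ===== SOURCE B (Python) =====
-- def shlex_parms_partition(parms):
--     """Split Options from Positional Args, in the classic way of ArgParse and Sh"""
--
--     parms = list(parms)
--     i = parms.index("--") if "--" in parms else len(parms)
--     head, tail = parms[:i], parms[i:]
--
--     options = [p for p in head if p != "-" and p.startswith("-")]
--     head_words = [p for p in head if not (p != "-" and p.startswith("-"))]
--     seps = [p for p in tail if p == "--"]
--     tail_words = [p for p in tail if p != "--"]
--
--     return (options, seps, head_words + tail_words)
-- ===== Notes on version B (the rewrite author's own statement) =====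
-- stated objective: alternative
-- what changed: B locates the first '--' separator up front with index(), slices the list there, and classifies each half with independent filters, instead of A's single loop threading a seps-seen flag through a stateful enumerate pass.
import Mathlib
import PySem

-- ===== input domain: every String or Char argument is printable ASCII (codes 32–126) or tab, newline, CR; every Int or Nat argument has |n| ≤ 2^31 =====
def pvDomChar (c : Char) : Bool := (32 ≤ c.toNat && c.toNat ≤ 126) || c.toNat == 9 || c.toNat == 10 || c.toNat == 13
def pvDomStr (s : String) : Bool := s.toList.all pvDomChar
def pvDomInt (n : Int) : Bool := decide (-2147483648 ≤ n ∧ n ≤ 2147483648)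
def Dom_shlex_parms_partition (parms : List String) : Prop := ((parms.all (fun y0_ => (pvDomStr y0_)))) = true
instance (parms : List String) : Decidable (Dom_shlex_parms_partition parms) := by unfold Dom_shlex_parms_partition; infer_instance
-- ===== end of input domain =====

-- B finds the first '--' with index() and slices, classifying each half with independent filters,
-- instead of A's single stateful loop; same O(n) cost, different decomposition (objective: alternative).


-- shared predicate: p != "-" and p.startswith("-")
def pvIsOption (p : String) : Bool := p != "-" && PySem.Str.startswith p "-"

-- ===== PORT A =====
-- one loop over enumerate(parms) threading (options, seps, words)
def shlexStepA (st : List String × List String × List String) (ip : Int × String) :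
    List String × List String × List String :=
  let parm := ip.2
  if parm == "--" then (st.1, st.2.1 ++ [parm], st.2.2)
  else if st.2.1.isEmpty && pvIsOption parm then (st.1 ++ [parm], st.2.1, st.2.2)
  else (st.1, st.2.1, st.2.2 ++ [parm])

def shlex_parms_partition (parms : List String) : List String × List String × List String :=
  (PySem.List.enumerate parms 0).foldl shlexStepA ([], [], [])

-- ===== PORT B =====
def shlex_parms_partition_alt (parms : List String) : List String × List String × List String :=
  let i : Nat := match PySem.List.index? parms "--" with
    | some k => k
    | none => parms.length
  let head := PySem.List.slice parms none (some (i : Int))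
  let tail := PySem.List.slice parms (some (i : Int)) none
  let options := head.filter (fun p => pvIsOption p)
  let head_words := head.filter (fun p => !(pvIsOption p))
  let seps := tail.filter (fun p => p == "--")
  let tail_words := tail.filter (fun p => p != "--")
  (options, seps, head_words ++ tail_words)

-- ===== PRECONDITION & SPEC =====
def Spec_shlex_parms_partition (parms : List String) (out : List String × List String × List String) : Prop := out = shlex_parms_partition_alt parms
instance (parms : List String) (out : List String × List String × List String) : Decidable (Spec_shlex_parms_partition parms out) := by unfold Spec_shlex_parms_partition; infer_instance

-- ===== CLAIM (what is proved, stated in full; the proofs are below) =====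
def Claim_equal_shlex_parms_partition : Prop := ∀ (parms : List String), Dom_shlex_parms_partition parms → Spec_shlex_parms_partition parms (shlex_parms_partition parms)

-- ===== LEMMAS AND PROOFS =====

-- common normal form: split at the first "--" via takeWhile/dropWhile
def pvSpecTriple (l : List String) : List String × List String × List String :=
  let tw := l.takeWhile (fun p => p != "--")
  let dw := l.dropWhile (fun p => p != "--")
  (tw.filter (fun p => pvIsOption p),
   dw.filter (fun p => p == "--"),
   tw.filter (fun p => !(pvIsOption p)) ++ dw.filter (fun p => p != "--"))

-- A's loop once seps is nonempty: only the last two components grow, by filters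
lemma foldA_nonempty (l : List String) : ∀ (os ss ws : List String) (s : Int), ss ≠ [] →
    (PySem.List.enumerate l s).foldl shlexStepA (os, ss, ws)
      = (os, ss ++ l.filter (fun p => p == "--"), ws ++ l.filter (fun p => p != "--")) := by
  induction l with
  | nil => intro os ss ws s h; simp [PySem.List.enumerate_nil]
  | cons x t ih =>
    intro os ss ws s h
    rw [PySem.List.enumerate_cons, List.foldl_cons]
    by_cases hx : x = "--"
    · subst hx
      have hstep : shlexStepA (os, ss, ws) (s, "--") = (os, ss ++ ["--"], ws) := by
        simp [shlexStepA]
      rw [hstep, ih os (ss ++ ["--"]) ws (s + 1) (by simp)]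
      simp [List.filter_cons]
    · have hne : (x == "--") = false := by simp [hx]
      have hie : ss.isEmpty = false := by simp [h]
      have hstep : shlexStepA (os, ss, ws) (s, x) = (os, ss, ws ++ [x]) := by
        simp [shlexStepA, hne, hie]
      rw [hstep, ih os ss (ws ++ [x]) (s + 1) h]
      simp [List.filter_cons, hne, hx]

-- A's loop from the empty-seps state computes the normal form
lemma foldA_empty (l : List String) : ∀ (os ws : List String) (s : Int),
    (PySem.List.enumerate l s).foldl shlexStepA (os, [], ws)
      = (os ++ (pvSpecTriple l).1, (pvSpecTriple l).2.1, ws ++ (pvSpecTriple l).2.2) := by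
  induction l with
  | nil => intro os ws s; simp [PySem.List.enumerate_nil, pvSpecTriple]
  | cons x t ih =>
    intro os ws s
    rw [PySem.List.enumerate_cons, List.foldl_cons]
    by_cases hx : x = "--"
    · subst hx
      have hstep : shlexStepA (os, [], ws) (s, "--") = (os, ["--"], ws) := by
        simp [shlexStepA]
      rw [hstep, foldA_nonempty t os ["--"] ws (s + 1) (by simp)]
      simp [pvSpecTriple]
    · have hne : (x == "--") = false := by simp [hx]
      have hne' : (x != "--") = true := by simp [hx]
      by_cases ho : pvIsOption x = true
      · have hstep : shlexStepA (os, [], ws) (s, x) = (os ++ [x], [], ws) := by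
          simp [shlexStepA, hne, ho]
        rw [hstep, ih (os ++ [x]) ws (s + 1)]
        simp [pvSpecTriple, List.takeWhile_cons, List.dropWhile_cons, hne', ho,
          List.filter_cons, List.append_assoc]
      · have ho' : pvIsOption x = false := by simpa using ho
        have hstep : shlexStepA (os, [], ws) (s, x) = (os, [], ws ++ [x]) := by
          simp [shlexStepA, hne, ho']
        rw [hstep, ih os (ws ++ [x]) (s + 1)]
        simp [pvSpecTriple, List.takeWhile_cons, List.dropWhile_cons, hne', ho',
          List.filter_cons, List.append_assoc]

lemma portA_eq_spec (l : List String) : shlex_parms_partition l = pvSpecTriple l := by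
  unfold shlex_parms_partition
  rw [foldA_empty l [] [] 0]
  simp

-- B in take/drop form (the slices unfolded)
def pvTD (l : List String) : List String × List String × List String :=
  let i : Nat := match PySem.List.index? l "--" with
    | some k => k
    | none => l.length
  ((l.take i).filter (fun p => pvIsOption p),
   (l.drop i).filter (fun p => p == "--"),
   (l.take i).filter (fun p => !(pvIsOption p)) ++ (l.drop i).filter (fun p => p != "--"))

lemma alt_eq_td (l : List String) : shlex_parms_partition_alt l = pvTD l := by
  simp only [shlex_parms_partition_alt, pvTD, PySem.List.slice_to_natCast,
    PySem.List.slice_from_natCast]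

lemma td_eq_spec (l : List String) : pvTD l = pvSpecTriple l := by
  induction l with
  | nil => rfl
  | cons x t ih =>
    by_cases hx : x = "--"
    · subst hx
      have h0 : (match PySem.List.index? ("--" :: t) "--" with
          | some k => k | none => ("--" :: t).length) = 0 := by
        rw [PySem.List.index?_cons_self]
      simp only [pvTD]
      rw [h0]
      simp [pvSpecTriple]
    · have hne : (x == "--") = false := by simp [hx]
      have hne' : (x != "--") = true := by simp [hx]
      have hidx : PySem.List.index? (x :: t) "--" = (PySem.List.index? t "--").map (· + 1) :=
        PySem.List.index?_cons_of_ne t hx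
      obtain ⟨n, hc, ht⟩ : ∃ n, (match PySem.List.index? (x :: t) "--" with
            | some k => k | none => (x :: t).length) = n + 1 ∧
          (match PySem.List.index? t "--" with
            | some k => k | none => t.length) = n := by
        rw [hidx]
        cases PySem.List.index? t "--" with
        | none => exact ⟨t.length, by simp, rfl⟩
        | some k => exact ⟨k, by simp, rfl⟩
      simp only [pvTD] at ih ⊢
      rw [hc]
      rw [ht] at ih
      have h1 := congrArg Prod.fst ih
      have h2 := congrArg (fun p : List String × List String × List String => p.2.1) ih
      have h3 := congrArg (fun p : List String × List String × List String => p.2.2) ih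
      simp only [pvSpecTriple] at h1 h2 h3
      simp only [List.take_succ_cons, List.drop_succ_cons]
      by_cases ho : pvIsOption x = true
      · simp [pvSpecTriple, List.filter_cons, List.takeWhile_cons, List.dropWhile_cons,
          hne, hne', ho, h1, h2, h3]
      · have ho' : pvIsOption x = false := by simpa using ho
        simp [pvSpecTriple, List.filter_cons, List.takeWhile_cons, List.dropWhile_cons,
          hne, hne', ho', h1, h2, h3]

lemma portB_eq_spec (l : List String) : shlex_parms_partition_alt l = pvSpecTriple l := by
  rw [alt_eq_td, td_eq_spec]

-- ===== VERDICT (by name: the statement is the Claim_ definition above) =====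
theorem shlex_parms_partition_spec : Claim_equal_shlex_parms_partition := by
  intro parms _
  unfold Spec_shlex_parms_partition
  rw [portA_eq_spec, portB_eq_spec]
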